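-- pv_equiv track=rewrite | github.com/Leapense/problems | 17276번: 배열 돌리기/solution.py | step_cw
-- ===== SOURCE A (Python) =====
-- def step_cw(a):
--     n = len(a)
--     m = n // 2
--     b = [row[:] for row in a]
--     for r in range(n):
--         b[r][m] = a[r][r]
--         b[r][n - 1 - r] = a[r][m]
--         b[m][n - 1 - r] = a[r][n - 1 - r]
--         b[r][r] = a[m][r]
--     return b
-- ===== SOURCE B (Python) =====
-- def step_cw(a):
--     n = len(a)
--     m = n // 2
--     def cell(r, c):
--         if r == m:
--             return a[m][m] if c == m else a[n - 1 - c][c]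
--         if c == r:
--             return a[m][r]
--         if c == n - 1 - r:
--             return a[r][m]
--         if c == m:
--             return a[r][r]
--         return a[r][c]
--     return [[cell(r, c) for c in range(n)] for r in range(n)]
-- ===== Notes on version B (the rewrite author's own statement) =====
-- stated objective: alternative
-- what changed: Instead of copying the array and performing four in-place line writes per loop iteration (where later writes overwrite earlier ones), B builds the result in one pass from a closed-form per-cell formula that names the last writer of each cell directly.
-- outside the precondition, e.g. on step_cw([[1, 2, 3], [4, 5, 6]]): A returns [[4, 2, 3], [4, 5, 6]], B returns [[4, 2], [4, 5]]
import Mathlib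
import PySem

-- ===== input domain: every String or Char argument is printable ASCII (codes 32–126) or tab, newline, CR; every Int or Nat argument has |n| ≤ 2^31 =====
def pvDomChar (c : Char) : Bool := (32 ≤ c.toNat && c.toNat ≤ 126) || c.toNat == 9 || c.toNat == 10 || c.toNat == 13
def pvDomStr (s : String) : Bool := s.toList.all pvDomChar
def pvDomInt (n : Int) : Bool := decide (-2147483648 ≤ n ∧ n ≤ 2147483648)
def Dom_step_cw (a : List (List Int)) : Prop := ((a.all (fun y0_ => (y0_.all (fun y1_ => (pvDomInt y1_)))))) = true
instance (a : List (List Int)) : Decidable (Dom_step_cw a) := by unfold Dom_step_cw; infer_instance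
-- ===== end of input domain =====

-- B replaces A's copy-then-overwrite loop (four in-place line writes per iteration) by a single
-- pass that builds each cell from a closed-form "last writer" formula; same O(n^2) cost (alternative).

-- ===== PORT A =====
-- a[i][j] with nonnegative in-range indices (IndexError excluded by Pre_step_cw)
def pvAget (a : List (List Int)) (i j : Int) : Int :=
  PySem.List.pyGetD (PySem.List.pyGetD a i []) j 0

-- b[i][j] = v with nonnegative in-range indices (IndexError excluded by Pre_step_cw)
def pvAset (b : List (List Int)) (i j : Int) (v : Int) : List (List Int) :=
  PySem.List.pySetD b i (PySem.List.pySetD (PySem.List.pyGetD b i []) j v)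

def step_cw (a : List (List Int)) : List (List Int) :=
  let n : Int := PySem.List.len a
  let m : Int := PySem.Int.floordiv n 2
  let b : List (List Int) := a.map (fun row => PySem.List.slice row none none)  -- row[:]
  (PySem.List.pyRange 0 n 1).foldl (fun b r =>
    let b := pvAset b r m (pvAget a r r)                        -- b[r][m] = a[r][r]
    let b := pvAset b r (n - 1 - r) (pvAget a r m)              -- b[r][n-1-r] = a[r][m]
    let b := pvAset b m (n - 1 - r) (pvAget a r (n - 1 - r))    -- b[m][n-1-r] = a[r][n-1-r]
    pvAset b r r (pvAget a m r)) b                              -- b[r][r] = a[m][r]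

-- ===== PORT B =====
def pvCell (a : List (List Int)) (n m r c : Int) : Int :=
  if r = m then (if c = m then pvAget a m m else pvAget a (n - 1 - c) c)
  else if c = r then pvAget a m r
  else if c = n - 1 - r then pvAget a r m
  else if c = m then pvAget a r r
  else pvAget a r c

def step_cw_alt (a : List (List Int)) : List (List Int) :=
  let n : Int := PySem.List.len a
  let m : Int := PySem.Int.floordiv n 2
  (PySem.List.pyRange 0 n 1).map (fun r =>
    (PySem.List.pyRange 0 n 1).map (fun c => pvCell a n m r c))

-- ===== PRECONDITION & SPEC =====
-- Pre_ restricts to the natural domain of this task: a square array (every row as long as the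
-- list itself).  On ragged input whose rows are too short A raises IndexError; rows longer than
-- the height are outside the intended square-matrix domain (A then returns the extra cells
-- untouched while B builds an n×n result) — see claim.json "cites".
def Pre_step_cw (a : List (List Int)) : Prop := ∀ row ∈ a, row.length = a.length
instance (a : List (List Int)) : Decidable (Pre_step_cw a) := by unfold Pre_step_cw; infer_instance

def pvWitness_step_cw : List (List Int) := [[1, 2, 3], [4, 5, 6], [7, 8, 9]]

def Spec_step_cw (a : List (List Int)) (out : List (List Int)) : Prop := out = step_cw_alt a
instance (a : List (List Int)) (out : List (List Int)) : Decidable (Spec_step_cw a out) := by unfold Spec_step_cw; infer_instance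

-- ===== CLAIM (what is proved, stated in full; the proofs are below) =====
def Claim_equal_step_cw : Prop := ∀ (a : List (List Int)), Dom_step_cw a → Pre_step_cw a → Spec_step_cw a (step_cw a)

-- ===== LEMMAS AND PROOFS =====

-- Nat-indexed cell access
def nA (a : List (List Int)) (r c : Nat) : Int := (a.getD r []).getD c 0

theorem fA_congr (A : Nat → Nat → Int) {i j i' j' : Nat} (h1 : i = i') (h2 : j = j') :
    A i j = A i' j' := by rw [h1, h2]

-- canonical n×n map-of-ranges form
def canon (N : Nat) (f : Nat → Nat → Int) : List (List Int) :=
  (List.range N).map (fun r => (List.range N).map (fun c => f r c))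

-- value of cell (r,c) after the first k iterations of A's loop
def valA (A : Nat → Nat → Int) (N k r c : Nat) : Int :=
  if r = N / 2 then
    (if c = N / 2 ∧ N / 2 < k then A (N / 2) (N / 2)
     else if N - 1 - c < k then A (N - 1 - c) c
     else A (N / 2) c)
  else if r < k then
    (if c = r then A (N / 2) r
     else if c = N - 1 - r then A r (N / 2)
     else if c = N / 2 then A r r
     else A r c)
  else A r c

theorem valA_m (A : Nat → Nat → Int) (N k c : Nat) :
    valA A N k (N / 2) c =
      (if c = N / 2 ∧ N / 2 < k then A (N / 2) (N / 2)
       else if N - 1 - c < k then A (N - 1 - c) c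
       else A (N / 2) c) := by
  unfold valA; rw [if_pos rfl]

theorem valA_row (A : Nat → Nat → Int) (N k r c : Nat) (hrm : r ≠ N / 2) (hrk : r < k) :
    valA A N k r c =
      (if c = r then A (N / 2) r
       else if c = N - 1 - r then A r (N / 2)
       else if c = N / 2 then A r r
       else A r c) := by
  unfold valA; rw [if_neg hrm, if_pos hrk]

theorem valA_else (A : Nat → Nat → Int) (N k r c : Nat) (hrm : r ≠ N / 2) (hrk : ¬ r < k) :
    valA A N k r c = A r c := by
  unfold valA; rw [if_neg hrm, if_neg hrk]

theorem valA_zero (A : Nat → Nat → Int) (N r c : Nat) : valA A N 0 r c = A r c := by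
  unfold valA
  by_cases h : r = N / 2
  · rw [if_pos h, if_neg (by omega), if_neg (by omega), h]
  · rw [if_neg h, if_neg (by omega)]

-- the four in-place writes of iteration k, expressed as a pointwise change of the cell formula
theorem stepVal (A : Nat → Nat → Int) (N k r c : Nat) (hk : k < N) (hr : r < N) (hc : c < N) :
    (if r = k ∧ c = k then A (N / 2) k
     else if r = N / 2 ∧ c = N - 1 - k then A k (N - 1 - k)
     else if r = k ∧ c = N - 1 - k then A k (N / 2)
     else if r = k ∧ c = N / 2 then A k k
     else valA A N k r c) = valA A N (k + 1) r c := by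
  by_cases hrm : r = N / 2
  · subst hrm
    by_cases hrk : N / 2 = k
    · subst hrk
      by_cases hck : c = N / 2
      · rw [if_pos (⟨rfl, hck⟩ : N / 2 = N / 2 ∧ c = N / 2), valA_m A N (N / 2 + 1) c,
            if_pos (⟨hck, Nat.lt_succ_self _⟩ : c = N / 2 ∧ N / 2 < N / 2 + 1)]
      · rw [if_neg (show ¬(N / 2 = N / 2 ∧ c = N / 2) from fun h => hck h.2)]
        by_cases hcn : c = N - 1 - N / 2
        · rw [if_pos (⟨rfl, hcn⟩ : N / 2 = N / 2 ∧ c = N - 1 - N / 2), valA_m A N (N / 2 + 1) c,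
              if_neg (show ¬(c = N / 2 ∧ N / 2 < N / 2 + 1) from fun h => hck h.1),
              if_pos (show N - 1 - c < N / 2 + 1 by omega)]
          exact fA_congr A (by omega) (by omega)
        · rw [if_neg (show ¬(N / 2 = N / 2 ∧ c = N - 1 - N / 2) from fun h => hcn h.2),
              if_neg (show ¬(N / 2 = N / 2 ∧ c = N - 1 - N / 2) from fun h => hcn h.2),
              if_neg (show ¬(N / 2 = N / 2 ∧ c = N / 2) from fun h => hck h.2),
              valA_m A N (N / 2) c, valA_m A N (N / 2 + 1) c,
              if_neg (show ¬(c = N / 2 ∧ N / 2 < N / 2) from fun h => hck h.1),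
              if_neg (show ¬(c = N / 2 ∧ N / 2 < N / 2 + 1) from fun h => hck h.1)]
          by_cases hlt : N - 1 - c < N / 2
          · rw [if_pos hlt, if_pos (show N - 1 - c < N / 2 + 1 by omega)]
          · rw [if_neg hlt, if_neg (show ¬(N - 1 - c < N / 2 + 1) by omega)]
    · by_cases hcn : c = N - 1 - k
      · rw [if_neg (show ¬(N / 2 = k ∧ c = k) from fun h => hrk h.1),
            if_pos (⟨rfl, hcn⟩ : N / 2 = N / 2 ∧ c = N - 1 - k), valA_m A N (k + 1) c,
            if_neg (show ¬(c = N / 2 ∧ N / 2 < k + 1) by omega),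
            if_pos (show N - 1 - c < k + 1 by omega)]
        exact fA_congr A (by omega) (by omega)
      · rw [if_neg (show ¬(N / 2 = k ∧ c = k) from fun h => hrk h.1),
            if_neg (show ¬(N / 2 = N / 2 ∧ c = N - 1 - k) from fun h => hcn h.2),
            if_neg (show ¬(N / 2 = k ∧ c = N - 1 - k) from fun h => hrk h.1),
            if_neg (show ¬(N / 2 = k ∧ c = N / 2) from fun h => hrk h.1),
            valA_m A N k c, valA_m A N (k + 1) c]
        by_cases h1 : c = N / 2 ∧ N / 2 < k
        · rw [if_pos h1, if_pos (⟨h1.1, by omega⟩ : c = N / 2 ∧ N / 2 < k + 1)]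
        · rw [if_neg h1]
          by_cases h2 : N - 1 - c < k
          · rw [if_pos h2, if_neg (show ¬(c = N / 2 ∧ N / 2 < k + 1) by omega),
                if_pos (show N - 1 - c < k + 1 by omega)]
          · rw [if_neg h2, if_neg (show ¬(c = N / 2 ∧ N / 2 < k + 1) by omega),
                if_neg (show ¬(N - 1 - c < k + 1) by omega)]
  · by_cases hrk : r = k
    · subst hrk
      by_cases hck : c = r
      · rw [if_pos (⟨rfl, hck⟩ : r = r ∧ c = r),
            valA_row A N (r + 1) r c hrm (Nat.lt_succ_self r), if_pos hck]
      · rw [if_neg (show ¬(r = r ∧ c = r) from fun h => hck h.2),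
            if_neg (show ¬(r = N / 2 ∧ c = N - 1 - r) from fun h => hrm h.1)]
        by_cases hcn : c = N - 1 - r
        · rw [if_pos (⟨rfl, hcn⟩ : r = r ∧ c = N - 1 - r),
              valA_row A N (r + 1) r c hrm (Nat.lt_succ_self r), if_neg hck, if_pos hcn]
        · rw [if_neg (show ¬(r = r ∧ c = N - 1 - r) from fun h => hcn h.2)]
          by_cases hcm : c = N / 2
          · rw [if_pos (⟨rfl, hcm⟩ : r = r ∧ c = N / 2),
                valA_row A N (r + 1) r c hrm (Nat.lt_succ_self r),
                if_neg hck, if_neg hcn, if_pos hcm]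
          · rw [if_neg (show ¬(r = r ∧ c = N / 2) from fun h => hcm h.2),
                valA_else A N r r c hrm (by omega),
                valA_row A N (r + 1) r c hrm (Nat.lt_succ_self r),
                if_neg hck, if_neg hcn, if_neg hcm]
    · rw [if_neg (show ¬(r = k ∧ c = k) from fun h => hrk h.1),
          if_neg (show ¬(r = N / 2 ∧ c = N - 1 - k) from fun h => hrm h.1),
          if_neg (show ¬(r = k ∧ c = N - 1 - k) from fun h => hrk h.1),
          if_neg (show ¬(r = k ∧ c = N / 2) from fun h => hrk h.1)]
      by_cases hlt : r < k
      · rw [valA_row A N k r c hrm hlt, valA_row A N (k + 1) r c hrm (by omega)]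
      · rw [valA_else A N k r c hrm hlt, valA_else A N (k + 1) r c hrm (by omega)]

theorem canon_congr (N : Nat) (f g : Nat → Nat → Int)
    (h : ∀ r < N, ∀ c < N, f r c = g r c) : canon N f = canon N g := by
  unfold canon
  refine List.map_congr_left (fun r hr => ?_)
  refine List.map_congr_left (fun c hc => ?_)
  exact h r (List.mem_range.mp hr) c (List.mem_range.mp hc)

theorem canon_of_square (a : List (List Int)) (h : ∀ row ∈ a, row.length = a.length) :
    a = canon a.length (nA a) := by
  apply List.ext_getElem
  · simp [canon]
  · intro r h1 h2
    have hrowlen : a[r].length = a.length := h a[r] (List.getElem_mem h1)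
    apply List.ext_getElem
    · simp [canon, hrowlen]
    · intro c hc1 hc2
      simp only [canon, List.getElem_map, List.getElem_range]
      have hc : c < a.length := by simpa [hrowlen] using hc1
      simp [nA, List.getD_eq_getElem?_getD, h1, hc1]

theorem pvAset_canon (a : List (List Int)) (N : Nat) (f : Nat → Nat → Int)
    (i j : Nat) (hi : i < N) (hj : j < N) (v : Int) :
    pvAset (canon N f) (i : Int) (j : Int) v
      = canon N (fun r c => if r = i ∧ c = j then v else f r c) := by
  unfold pvAset
  simp only [PySem.List.pySetD_natCast, PySem.List.pyGetD_natCast]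
  apply List.ext_getElem
  · simp [canon]
  · intro r hr1 hr2
    have hrN : r < N := by simpa [canon] using hr1
    have hgetDi : (canon N f).getD i [] = (List.range N).map (fun c => f i c) := by
      simp [canon, List.getD_eq_getElem?_getD, hi]
    simp only [hgetDi]
    simp only [canon, List.getElem_set, List.getElem_map, List.getElem_range]
    by_cases hri : i = r
    · subst hri
      simp only [if_pos rfl]
      apply List.ext_getElem
      · simp
      · intro c hc1 hc2
        have hcN : c < N := by simpa using hc1
        simp only [List.getElem_set, List.getElem_map, List.getElem_range]
        by_cases hcj : j = c
        · subst hcj; simp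
        · have hjc : ¬ c = j := fun h => hcj h.symm
          simp [hcj, hjc]
    · simp only [if_neg hri]
      apply List.map_congr_left (fun c hc => ?_)
      have : ¬ (r = i) := fun h => hri h.symm
      simp [this]

theorem pvAget_eq_nA (a : List (List Int)) (i j : Nat) :
    pvAget a (i : Int) (j : Int) = nA a i j := by
  simp [pvAget, nA, PySem.List.pyGetD_natCast]

-- one loop iteration of A, from the canonical form at step k to step k+1
theorem stepA (a : List (List Int)) (N k : Nat) (hk : k < N) :
    (let n : Int := (N : Int)
     let m : Int := PySem.Int.floordiv n 2
     let r : Int := (k : Int)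
     let b := canon N (valA (nA a) N k)
     let b := pvAset b r m (pvAget a r r)
     let b := pvAset b r (n - 1 - r) (pvAget a r m)
     let b := pvAset b m (n - 1 - r) (pvAget a r (n - 1 - r))
     pvAset b r r (pvAget a m r))
      = canon N (valA (nA a) N (k + 1)) := by
  have hN1 : 1 ≤ N := by omega
  have hm : PySem.Int.floordiv (N : Int) 2 = ((N / 2 : Nat) : Int) := by
    exact_mod_cast PySem.Int.floordiv_natCast N 2
  have hnr : (N : Int) - 1 - (k : Int) = ((N - 1 - k : Nat) : Int) := by omega
  have hmN : N / 2 < N := by omega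
  have hnrN : N - 1 - k < N := by omega
  simp only [hm, hnr, pvAget_eq_nA]
  rw [pvAset_canon a N (valA (nA a) N k) k (N / 2) hk hmN,
      pvAset_canon a N _ k (N - 1 - k) hk hnrN,
      pvAset_canon a N _ (N / 2) (N - 1 - k) hmN hnrN,
      pvAset_canon a N _ k k hk hk]
  exact canon_congr N _ _ (fun r hr c hc => stepVal (nA a) N k r c hk hr hc)

theorem fold_canon (st : Nat → List (List Int)) (G : List (List Int) → Nat → List (List Int))
    (n : Nat) (hstep : ∀ k < n, G (st k) k = st (k + 1)) :
    ∀ k, k ≤ n → (List.range k).foldl G (st 0) = st k := by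
  intro k hk
  induction k with
  | zero => rfl
  | succ k ih =>
      rw [List.range_succ, List.foldl_append, ih (by omega)]
      simpa using hstep k (by omega)

-- B's cell formula coincides with the loop's final cell formula
theorem cellB_eq (a : List (List Int)) (N r c : Nat) (hr : r < N) (hc : c < N) :
    pvCell a (N : Int) ((N / 2 : Nat) : Int) ((r : Nat) : Int) ((c : Nat) : Int)
      = valA (nA a) N N r c := by
  have hN1 : 1 ≤ N := by omega
  have e1 : (N : Int) - 1 - (r : Int) = ((N - 1 - r : Nat) : Int) := by omega
  have e2 : (N : Int) - 1 - (c : Int) = ((N - 1 - c : Nat) : Int) := by omega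
  unfold pvCell
  rw [e1, e2]
  simp only [Nat.cast_inj, pvAget_eq_nA]
  by_cases hrm : r = N / 2
  · rw [if_pos hrm, hrm, valA_m]
    by_cases hcm : c = N / 2
    · rw [if_pos hcm, if_pos ⟨hcm, by omega⟩]
    · rw [if_neg hcm, if_neg (by omega), if_pos (by omega)]
  · rw [if_neg hrm, valA_row (nA a) N N r c hrm hr]

theorem initA (a : List (List Int)) (hpre : ∀ row ∈ a, row.length = a.length) :
    (a.map fun row => PySem.List.slice row none none)
      = canon a.length (valA (nA a) a.length 0) := by
  simp only [PySem.List.slice_none_none, List.map_id']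
  exact (canon_of_square a hpre).trans
    (canon_congr _ _ _ (fun r _ c _ => (valA_zero (nA a) a.length r c).symm))

theorem stepA_full (a : List (List Int)) (hpre : ∀ row ∈ a, row.length = a.length) :
    step_cw a = canon a.length (valA (nA a) a.length a.length) := by
  unfold step_cw
  simp only [PySem.List.len_eq]
  rw [initA a hpre, PySem.List.pyRange_one]
  simp only [sub_zero, Int.toNat_natCast]
  rw [List.foldl_map]
  exact fold_canon (fun k => canon a.length (valA (nA a) a.length k)) _ a.length
    (fun k hk => by simp only [zero_add]; exact stepA a a.length k hk) a.length le_rfl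

theorem altB_full (a : List (List Int)) :
    step_cw_alt a = canon a.length (valA (nA a) a.length a.length) := by
  unfold step_cw_alt
  have hm : PySem.Int.floordiv ((a.length : Nat) : Int) 2 = ((a.length / 2 : Nat) : Int) := by
    exact_mod_cast PySem.Int.floordiv_natCast a.length 2
  simp only [PySem.List.len_eq, hm, PySem.List.pyRange_one, sub_zero, Int.toNat_natCast,
    List.map_map, canon]
  refine List.map_congr_left (fun r hr => ?_)
  refine List.map_congr_left (fun c hc => ?_)
  simp only [Function.comp_apply, zero_add]
  exact cellB_eq a a.length r c (List.mem_range.mp hr) (List.mem_range.mp hc)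

-- ===== VERDICT (by name: the statement is the Claim_ definition above) =====
theorem step_cw_spec : Claim_equal_step_cw := by
  intro a _ hpre
  unfold Spec_step_cw
  rw [stepA_full a hpre, altB_full a]
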